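-- pv_equiv track=rewrite | github.com/1933211129/dimensional-reduction | algorithms/mcb_ar.py | _prune_clause_masks
-- ===== SOURCE A (Python) =====
-- from typing import FrozenSet, Iterable, List, Optional, Sequence, Set, Tuple
--
-- def _prune_clause_masks(clauses: Sequence[int]) -> List[int]:
--     unique_clauses = sorted(set(clauses), key=lambda mask: (mask.bit_count(), mask))
--     pruned: List[int] = []
--     for clause in unique_clauses:
--         if any((existing & clause) == existing for existing in pruned):
--             continue
--         pruned.append(clause)
--     return pruned
-- ===== SOURCE B (Python) =====
-- def _prune_clause_masks(clauses):
--     uniq = sorted(set(clauses), key=lambda mask: (mask.bit_count(), mask))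
--     return [c for i, c in enumerate(uniq)
--             if not any((uniq[j] & c) == uniq[j] for j in range(i))]
-- ===== Notes on version B (the rewrite author's own statement) =====
-- stated objective: alternative
-- what changed: Replaces A's order-dependent accumulator loop (append a clause only if no already-kept clause is a bitwise subset) by an independent per-element test computed in one comprehension with no accumulator: keep the clause at position i of the sorted unique list iff no clause at an earlier position is a bitwise subset of it.
import Mathlib
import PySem

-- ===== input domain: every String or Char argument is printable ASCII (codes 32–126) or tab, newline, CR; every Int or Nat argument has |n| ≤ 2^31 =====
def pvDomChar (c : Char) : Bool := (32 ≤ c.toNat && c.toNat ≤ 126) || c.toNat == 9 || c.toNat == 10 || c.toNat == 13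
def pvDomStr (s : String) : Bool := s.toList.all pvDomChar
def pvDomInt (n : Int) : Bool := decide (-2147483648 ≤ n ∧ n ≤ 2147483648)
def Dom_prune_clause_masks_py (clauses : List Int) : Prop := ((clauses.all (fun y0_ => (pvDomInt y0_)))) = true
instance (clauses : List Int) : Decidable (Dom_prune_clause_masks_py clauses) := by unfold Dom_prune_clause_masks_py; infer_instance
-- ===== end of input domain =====

-- B replaces A's accumulator loop (append a clause only if no already-kept clause is a bitwise
-- subset of it) by an independent per-element test: keep each unique clause iff no clause earlier
-- in the sorted unique list is a bitwise subset of it; alternative decomposition, same asymptotic cost.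

-- shared sort key: Python's (mask.bit_count(), mask), compared lexicographically
def pyKey (m : Int) : Nat ×ₗ Int := toLex (PySem.Int.bitCount m, m)

-- ===== PORT A =====
def prune_clause_masks_py (clauses : List Int) : List Int :=
  let unique_clauses := PySem.List.sorted (PySem.Set.ofList clauses) pyKey
  unique_clauses.foldl
    (fun pruned clause =>
      if pruned.any (fun existing => PySem.Int.band existing clause == existing) then pruned
      else pruned ++ [clause]) []

-- ===== PORT B =====
def prune_clause_masks_py_alt (clauses : List Int) : List Int :=
  let uniq := PySem.List.sorted (PySem.Set.ofList clauses) pyKey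
  ((PySem.List.enumerate uniq).filter (fun ic =>
      !(PySem.List.pyRange 0 ic.1 1).any (fun j =>
          PySem.Int.band (PySem.List.pyGetD uniq j 0) ic.2 == PySem.List.pyGetD uniq j 0))).map
    (fun ic => ic.2)

-- ===== PRECONDITION & SPEC =====
def Spec_prune_clause_masks_py (clauses : List Int) (out : List Int) : Prop := out = prune_clause_masks_py_alt clauses
instance (clauses : List Int) (out : List Int) : Decidable (Spec_prune_clause_masks_py clauses out) := by unfold Spec_prune_clause_masks_py; infer_instance

-- ===== CLAIM (what is proved, stated in full; the proofs are below) =====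
def Claim_equal_prune_clause_masks_py : Prop := ∀ (clauses : List Int), Dom_prune_clause_masks_py clauses → Spec_prune_clause_masks_py clauses (prune_clause_masks_py clauses)

-- ===== LEMMAS AND PROOFS =====

-- A's loop body and B's comprehension, named for the proofs (definitionally the ports' code)
def pvStep (pruned : List Int) (clause : Int) : List Int :=
  if pruned.any (fun existing => PySem.Int.band existing clause == existing) then pruned
  else pruned ++ [clause]

def pvB (X : List Int) : List Int :=
  ((PySem.List.enumerate X).filter (fun ic =>
      !(PySem.List.pyRange 0 ic.1 1).any (fun j =>
          PySem.Int.band (PySem.List.pyGetD X j 0) ic.2 == PySem.List.pyGetD X j 0))).map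
    (fun ic => ic.2)


-- bit k of the infinite two's-complement representation of x (Python's semantics)
def pvBit (x : Int) (k : Nat) : Bool :=
  if 0 ≤ x then x.toNat.testBit k else !((-x - 1).toNat.testBit k)

lemma pvBand_imp {a b : Int} (h : PySem.Int.band a b = a) :
    ∀ k, pvBit a k = true → pvBit b k = true := by
  intro k
  by_cases ha : 0 ≤ a <;> by_cases hb : 0 ≤ b <;>
    simp only [pvBit, if_pos, ha, hb, if_false] <;> intro hk
  · -- a≥0 b≥0
    have h' : a.toNat &&& b.toNat = a.toNat := by
      simp only [PySem.Int.band, ha, hb, if_true] at h; omega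
    have ht := congrArg (fun n => n.testBit k) h'
    simp only [Nat.testBit_and, hk, Bool.true_and] at ht
    exact ht
  · -- a≥0 b<0
    have hz : a.toNat &&& (-b - 1).toNat = 0 := by
      simp only [PySem.Int.band, ha, hb, if_true, if_false] at h
      have hle : a.toNat &&& (-b - 1).toNat ≤ a.toNat := Nat.and_le_left
      omega
    have ht := congrArg (fun n => n.testBit k) hz
    simp only [Nat.testBit_and, Nat.zero_testBit, hk, Bool.true_and] at ht
    simp only [ht, Bool.not_false]
  · -- a<0 b≥0 : impossible
    exfalso
    simp only [PySem.Int.band, ha, hb, if_true, if_false] at h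
    omega
  · -- a<0 b<0
    have h' : (-a - 1).toNat ||| (-b - 1).toNat = (-a - 1).toNat := by
      simp only [PySem.Int.band, ha, hb, if_false] at h; omega
    have ht := congrArg (fun n => n.testBit k) h'
    simp only [Nat.testBit_or] at ht
    simp only [Bool.not_eq_true'] at hk ⊢
    cases hcb : (-b - 1).toNat.testBit k with
    | false => rfl
    | true => rw [hcb, Bool.or_true] at ht; rw [← ht] at hk; simp at hk

lemma pvImp_band {a c : Int} (h : ∀ k, pvBit a k = true → pvBit c k = true) :
    PySem.Int.band a c = a := by
  by_cases ha : 0 ≤ a <;> by_cases hc : 0 ≤ c <;>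
    simp only [PySem.Int.band, ha, hc, if_true, if_false]
  · -- both nonneg: aN &&& cN = aN
    have h' : a.toNat &&& c.toNat = a.toNat := by
      apply Nat.eq_of_testBit_eq
      intro k
      rw [Nat.testBit_and]
      cases hk : a.toNat.testBit k with
      | false => simp
      | true =>
        have ht := h k (by simp only [pvBit, if_pos ha]; exact hk)
        simp only [pvBit, if_pos hc] at ht
        rw [ht]; rfl
    omega
  · -- a≥0 c<0 : aN &&& cM = 0
    have h' : a.toNat &&& (-c - 1).toNat = 0 := by
      apply Nat.eq_of_testBit_eq
      intro k
      rw [Nat.testBit_and, Nat.zero_testBit]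
      cases hk : a.toNat.testBit k with
      | false => simp
      | true =>
        have ht := h k (by simp only [pvBit, if_pos ha]; exact hk)
        simp only [pvBit, if_neg hc, Bool.not_eq_true'] at ht
        rw [ht, Bool.and_false]
    omega
  · -- a<0 c≥0 : impossible hypothesis
    exfalso
    have h1 : (-a - 1).toNat.testBit (max (-a - 1).toNat c.toNat) = false :=
      Nat.testBit_lt_two_pow (lt_of_le_of_lt (Nat.le_max_left _ _) Nat.lt_two_pow_self)
    have h2 : c.toNat.testBit (max (-a - 1).toNat c.toNat) = false :=
      Nat.testBit_lt_two_pow (lt_of_le_of_lt (Nat.le_max_right _ _) Nat.lt_two_pow_self)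
    have ht := h (max (-a - 1).toNat c.toNat)
      (by simp only [pvBit, if_neg ha, h1, Bool.not_false])
    simp only [pvBit, if_pos hc, h2] at ht
    exact Bool.false_ne_true ht
  · -- both negative : aM ||| cM = aM
    have h' : (-a - 1).toNat ||| (-c - 1).toNat = (-a - 1).toNat := by
      apply Nat.eq_of_testBit_eq
      intro k
      rw [Nat.testBit_or]
      cases hk : (-a - 1).toNat.testBit k with
      | true => simp
      | false =>
        have ht := h k (by simp only [pvBit, if_neg ha, hk, Bool.not_false])
        simp only [pvBit, if_neg hc, Bool.not_eq_true'] at ht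
        rw [ht]; rfl
    omega

lemma pvSub_trans {a b c : Int} (h1 : PySem.Int.band a b = a) (h2 : PySem.Int.band b c = b) :
    PySem.Int.band a c = a :=
  pvImp_band (fun k hk => pvBand_imp h2 k (pvBand_imp h1 k hk))

-- B's inner generator over range(i) is A's-side scan of the length-i prefix
lemma pvTest (X : List Int) (k : Nat) (hk : k ≤ X.length) (c : Int) :
    (PySem.List.pyRange 0 (k : Int) 1).any (fun j =>
        PySem.Int.band (PySem.List.pyGetD X j 0) c == PySem.List.pyGetD X j 0)
    = (X.take k).any (fun e => PySem.Int.band e c == e) := by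
  induction k with
  | zero => simp
  | succ k IH =>
    have hk' : k ≤ X.length := Nat.le_of_succ_le hk
    have hcast : ((k + 1 : Nat) : Int) = (k : Int) + 1 := by push_cast; ring
    rw [hcast, PySem.List.pyRange_one_succ_right (by positivity), List.any_append,
      IH hk', List.take_add_one, List.any_append]
    have hget : X[k]? = some X[k] := List.getElem?_eq_getElem hk
    simp [PySem.List.pyGetD_natCast, List.getD_eq_getElem?_getD, hget]

lemma pvB_mem_iff (p : List Int) (x : Int) :
    x ∈ pvB p ↔ ∃ k, ∃ (hk : k < p.length), x = p[k] ∧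
      (p.take k).any (fun e => PySem.Int.band e p[k] == e) = false := by
  simp only [pvB, List.mem_map, List.mem_filter, PySem.List.mem_enumerate_iff]
  constructor
  · rintro ⟨⟨i, c⟩, ⟨⟨k, hk, hpair⟩, htest⟩, hx⟩
    obtain ⟨hi, hc⟩ := Prod.mk.injEq .. ▸ hpair
    subst hc
    refine ⟨k, hk, hx.symm, ?_⟩
    rw [hi] at htest
    simp only [zero_add] at htest
    rw [pvTest p k (le_of_lt hk)] at htest
    simpa [Bool.not_eq_true'] using htest
  · rintro ⟨k, hk, hx, htest⟩
    refine ⟨(k, p[k]), ⟨⟨k, hk, by simp⟩, ?_⟩, hx.symm⟩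
    simp only []
    rw [pvTest p k (le_of_lt hk)]
    simpa [Bool.not_eq_true'] using htest

lemma pvB_sub_of_mem (p : List Int) (x : Int) (hx : x ∈ pvB p) : x ∈ p := by
  obtain ⟨k, hk, hx, -⟩ := (pvB_mem_iff p x).mp hx
  exact hx ▸ List.getElem_mem hk

lemma pvClosure (p : List Int) (c : Int) :
    ∀ i, ∀ (hi : i < p.length), PySem.Int.band p[i] c = p[i] →
      ∃ x ∈ pvB p, PySem.Int.band x c = x := by
  intro i
  induction i using Nat.strong_induction_on with
  | _ i IH =>
    intro hi hsub
    by_cases h : (p.take i).any (fun e => PySem.Int.band e p[i] == e) = true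
    · -- p[i] is pruned by some strictly earlier element; recurse on its index
      rw [List.any_eq_true] at h
      obtain ⟨w, hwmem, hwsub⟩ := h
      obtain ⟨j, hj, hje⟩ := List.mem_iff_getElem.mp hwmem
      have hjlen : j < p.length := lt_of_lt_of_le hj (by simp [List.length_take])
      have hji : j < i := lt_of_lt_of_le hj (by simp [List.length_take])
      have hwsub' : PySem.Int.band p[j] p[i] = p[j] := by
        have hgt : (List.take i p)[j] = p[j] := List.getElem_take
        rw [hgt] at hje
        exact beq_iff_eq.mp (hje ▸ hwsub)
      exact IH j hji hjlen (pvSub_trans hwsub' hsub)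
    · simp only [Bool.not_eq_true] at h
      exact ⟨p[i], (pvB_mem_iff p _).mpr ⟨i, hi, rfl, h⟩, hsub⟩

lemma pvAny (p : List Int) (c : Int) :
    (pvB p).any (fun e => PySem.Int.band e c == e) = p.any (fun e => PySem.Int.band e c == e) := by
  cases hp : p.any (fun e => PySem.Int.band e c == e) with
  | true =>
    rw [List.any_eq_true] at hp ⊢
    obtain ⟨w, hw, hsub⟩ := hp
    obtain ⟨j, hj, hje⟩ := List.mem_iff_getElem.mp hw
    obtain ⟨x, hx, hxsub⟩ := pvClosure p c j hj (beq_iff_eq.mp (hje ▸ hsub))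
    exact ⟨x, hx, beq_iff_eq.mpr hxsub⟩
  | false =>
    rw [List.any_eq_false] at hp ⊢
    exact fun x hx => hp x (pvB_sub_of_mem p x hx)

lemma pvB_append_singleton (p : List Int) (c : Int) :
    pvB (p ++ [c]) = pvStep (pvB p) c := by
  rw [pvStep, pvAny]
  unfold pvB
  rw [PySem.List.enumerate_append, List.filter_append, List.map_append]
  have h1 : ∀ ic ∈ PySem.List.enumerate p 0,
      (!(PySem.List.pyRange 0 ic.1 1).any (fun j =>
          PySem.Int.band (PySem.List.pyGetD (p ++ [c]) j 0) ic.2 == PySem.List.pyGetD (p ++ [c]) j 0))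
      = (!(PySem.List.pyRange 0 ic.1 1).any (fun j =>
          PySem.Int.band (PySem.List.pyGetD p j 0) ic.2 == PySem.List.pyGetD p j 0)) := by
    intro ic hic
    obtain ⟨k, hk, hpair⟩ := (PySem.List.mem_enumerate_iff p 0 ic).mp hic
    subst hpair
    simp only [zero_add]
    rw [pvTest (p ++ [c]) k (by simp; omega), pvTest p k (le_of_lt hk),
      List.take_append_of_le_length (le_of_lt hk)]
  rw [List.filter_congr h1]
  have h2 : PySem.List.enumerate [c] (0 + ↑p.length) = [((p.length : Int), c)] := by
    simp [PySem.List.enumerate]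
  rw [h2]
  simp only [List.filter]
  rw [show ((p.length : Int)) = ((p.length : Nat) : Int) from rfl]
  rw [pvTest (p ++ [c]) p.length (by simp), List.take_left]
  by_cases hc : p.any (fun e => PySem.Int.band e c == e) = true
  · rw [hc]; simp
  · simp only [Bool.not_eq_true] at hc
    rw [hc]; simp

lemma pvFold : ∀ (rest p : List Int),
    rest.foldl pvStep (pvB p) = pvB (p ++ rest) := by
  intro rest
  induction rest with
  | nil => intro p; simp
  | cons c rest IH =>
    intro p
    rw [List.foldl_cons, ← pvB_append_singleton, IH (p ++ [c]), List.append_assoc]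
    rfl

-- ===== VERDICT (by name: the statement is the Claim_ definition above) =====
theorem prune_clause_masks_py_spec : Claim_equal_prune_clause_masks_py := by
  intro clauses _
  unfold Spec_prune_clause_masks_py prune_clause_masks_py prune_clause_masks_py_alt
  exact pvFold (PySem.List.sorted (PySem.Set.ofList clauses) pyKey) []
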